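-- pv_equiv track=rewrite | github.com/yuliapolusytok/puzzle | puzzle.py | gorizontal_checking
-- ===== SOURCE A (Python) =====
-- def gorizontal_checking(board: list[str]) -> bool:
--     """
--     The function do check if elem in list have more than one similar digt
--     :param board: board of game
--     :return: bool
--     >>> check_digits([ "**** ****", "***1 ****", "**  3****", "* 4 1****",\
--      "     9 5 "," 6  83  *", "3   1  **", "  8  2***", "  2  ****"])
--     True
--     """
--     r = [i.replace('*', '') for i in board]
--     for i in r:
--         i = i.replace(' ', '')
--         for k in i:
--             if i.count(k) > 1:
--                 return False
--     return True
-- ===== SOURCE B (Python) =====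
-- def gorizontal_checking(board: list[str]) -> bool:
--     for row in board:
--         cells = sorted(c for c in row if c != '*' and c != ' ')
--         for a, b in zip(cells, cells[1:]):
--             if a == b:
--                 return False
--     return True
-- ===== Notes on version B (the rewrite author's own statement) =====
-- stated objective: alternative
-- what changed: Replaces A's per-character repeated count scan (count(k)>1 for every k) with sort-then-adjacent-compare: each row's non-'*', non-' ' characters are sorted once and scanned for an equal neighbouring pair.
import Mathlib
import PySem

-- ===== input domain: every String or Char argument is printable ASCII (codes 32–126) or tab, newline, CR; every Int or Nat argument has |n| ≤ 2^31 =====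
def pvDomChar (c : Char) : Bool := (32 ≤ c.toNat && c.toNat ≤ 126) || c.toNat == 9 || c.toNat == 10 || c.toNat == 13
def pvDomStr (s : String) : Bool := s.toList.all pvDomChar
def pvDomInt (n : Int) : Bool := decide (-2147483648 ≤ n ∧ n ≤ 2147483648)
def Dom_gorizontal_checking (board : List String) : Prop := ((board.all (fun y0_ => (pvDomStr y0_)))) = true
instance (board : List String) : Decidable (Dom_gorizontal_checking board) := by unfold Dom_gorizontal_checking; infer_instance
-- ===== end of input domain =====

-- B replaces A's repeated count(k)>1 scan per character by sorting each cleaned row once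
-- and comparing adjacent entries; same return value, no speed claim.

-- ===== PORT A =====
-- for-loops with early 'return False' become List.all / List.any; i.count(k) for the
-- single character k counts its occurrences in i, ported exactly as List.count.
def gorizontal_checking (board : List String) : Bool :=
  let r := board.map (fun i => PySem.Str.replace i "*" "")
  r.all (fun i0 =>
    let i := PySem.Str.replace i0 " " ""
    !(i.toList.any (fun k => decide (1 < i.toList.count k))))

-- ===== PORT B =====
-- the 'for a, b in zip(cells, cells[1:])' adjacent scan with early return, as recursion
def pvAdjDup : List Char → Bool
  | a :: b :: t => a == b || pvAdjDup (b :: t)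
  | _ => false

def gorizontal_checking_alt (board : List String) : Bool :=
  board.all (fun row =>
    !(pvAdjDup (PySem.List.sorted
        (row.toList.filter (fun c => !(c == '*') && !(c == ' '))) (fun x => x) false)))

-- ===== PRECONDITION & SPEC =====
def Spec_gorizontal_checking (board : List String) (out : Bool) : Prop := out = gorizontal_checking_alt board
instance (board : List String) (out : Bool) : Decidable (Spec_gorizontal_checking board out) := by unfold Spec_gorizontal_checking; infer_instance

-- ===== CLAIM (what is proved, stated in full; the proofs are below) =====
def Claim_equal_gorizontal_checking : Prop := ∀ (board : List String), Dom_gorizontal_checking board → Spec_gorizontal_checking board (gorizontal_checking board)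

-- ===== LEMMAS AND PROOFS =====

-- replacing a single character by the empty string is filtering it out
theorem replace_go_single (x : Char) (l acc : List Char) (fuel : Nat)
    (h : l.length ≤ fuel) :
    PySem.Chars.replace.go [x] [] fuel l acc
      = acc.reverse ++ l.filter (fun c => !(c == x)) := by
  induction l generalizing fuel acc with
  | nil => cases fuel <;> simp [PySem.Chars.replace.go]
  | cons c t ih =>
    cases fuel with
    | zero => simp at h
    | succ n =>
      simp only [PySem.Chars.replace.go]
      by_cases hc : c = x
      · subst hc
        rw [if_pos (by simp [List.isPrefixOf])]
        rw [show List.drop [c].length (c :: t) = t by simp]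
        rw [ih _ _ (by simpa using Nat.le_of_succ_le_succ h)]
        simp
      · have hxc : ¬ x = c := fun hh => hc hh.symm
        rw [if_neg (by simp [List.isPrefixOf, hxc])]
        rw [ih _ _ (by simpa using Nat.le_of_succ_le_succ h)]
        simp [hc]

theorem replace_single_eq_filter (cs : List Char) (x : Char) :
    PySem.Chars.replace cs [x] [] = cs.filter (fun c => !(c == x)) := by
  rw [PySem.Chars.replace, if_neg (by simp)]
  exact replace_go_single x cs [] cs.length le_rfl

-- on a weakly increasing list, no equal adjacent pair = no duplicates at all
theorem adjDup_sorted (s : List Char) (hpw : s.Pairwise (· ≤ ·)) :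
    pvAdjDup s = false ↔ s.Nodup := by
  induction s with
  | nil => simp [pvAdjDup]
  | cons a t ih =>
    cases t with
    | nil => simp [pvAdjDup]
    | cons b u =>
      rw [List.pairwise_cons] at hpw
      have hab : a ≤ b := hpw.1 b (by simp)
      have hbu : ∀ c ∈ u, b ≤ c := (List.pairwise_cons.mp hpw.2).1
      have ihs := ih hpw.2
      simp only [pvAdjDup, Bool.or_eq_false_iff, beq_eq_false_iff_ne, ihs, List.nodup_cons]
      constructor
      · rintro ⟨hne, hnd⟩
        refine ⟨?_, hnd⟩
        intro hmem
        rcases List.mem_cons.mp hmem with h1 | h2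
        · exact hne h1
        · exact hne (le_antisymm hab (hbu a h2))
      · rintro ⟨hnm, hnd⟩
        exact ⟨fun h => hnm (h ▸ List.mem_cons_self), hnd⟩

-- the per-row core: 'some character occurs more than once' = 'sorted row has an equal neighbour pair'
theorem row_core (l : List Char) :
    (l.any (fun k => decide (1 < l.count k)))
      = pvAdjDup (PySem.List.sorted l (fun x => x) false) := by
  set s := PySem.List.sorted l (fun x => x) false with hs
  have hperm : s.Perm l := PySem.List.sorted_perm l _ _
  have hpw : s.Pairwise (· ≤ ·) := by
    have := PySem.List.sorted_pairwise l (fun x => x)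
    simpa [← hs] using this
  rw [Bool.eq_iff_iff]
  constructor
  · intro h
    simp only [List.any_eq_true, decide_eq_true_eq] at h
    obtain ⟨k, _, hk⟩ := h
    by_contra hfalse
    have hnd : l.Nodup :=
      hperm.nodup_iff.mp ((adjDup_sorted s hpw).mp (by simpa using hfalse))
    have : l.count k ≤ 1 := List.nodup_iff_count_le_one.mp hnd k
    omega
  · intro h
    by_contra hfalse
    simp only [List.any_eq_true, decide_eq_true_eq, not_exists, not_and, not_lt] at hfalse
    have hnd : l.Nodup := List.nodup_iff_count_le_one.mpr (fun a => by
      by_cases ha : a ∈ l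
      · exact hfalse a ha
      · simp [List.count_eq_zero_of_not_mem ha])
    have : pvAdjDup s = false := (adjDup_sorted s hpw).mpr (hperm.nodup_iff.mpr hnd)
    simp [this] at h

theorem row_eq (i : String) :
    (!((PySem.Str.replace (PySem.Str.replace i "*" "") " " "").toList.any
        (fun k => decide (1 < (PySem.Str.replace (PySem.Str.replace i "*" "") " " "").toList.count k))))
      = (!(pvAdjDup (PySem.List.sorted
            (i.toList.filter (fun c => !(c == '*') && !(c == ' '))) (fun x => x) false))) := by
  have hl : (PySem.Str.replace (PySem.Str.replace i "*" "") " " "").toList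
      = i.toList.filter (fun c => !(c == '*') && !(c == ' ')) := by
    simp only [PySem.Str.toList_replace]
    rw [show ("*" : String).toList = ['*'] from rfl, show (" " : String).toList = [' '] from rfl,
      show ("" : String).toList = [] from rfl,
      replace_single_eq_filter, replace_single_eq_filter, List.filter_filter]
    congr 1
    funext c
    simp [Bool.and_comm]
  rw [hl, row_core]

-- ===== VERDICT (by name: the statement is the Claim_ definition above) =====
theorem gorizontal_checking_spec : Claim_equal_gorizontal_checking := by
  intro board hd
  clear hd
  show gorizontal_checking board = gorizontal_checking_alt board
  unfold gorizontal_checking gorizontal_checking_alt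
  induction board with
  | nil => rfl
  | cons s t ih =>
    simp only [List.map_cons, List.all_cons]
    exact congrArg₂ (· && ·) (row_eq s) ih
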